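-- pv_equiv track=rewrite | github.com/ericmerle3789/Collatz-Junction-Theorem | scripts/research/r43_ehrhart_formulation.py | P_c_mod
-- ===== SOURCE A (Python) =====
-- def P_c_mod(c_vec, g, mod):
--     """Compute P_B(g) mod m using c-coordinates directly.
--     B_j = c_0 + c_1 + ... + c_j, so 2^{B_j} = prod_{i=0}^{j} 2^{c_i}.
--     P_c(g) = sum_{j=0}^{k-1} g^j * prod_{i=0}^{j} 2^{c_i} mod m.
--     """
--     k = len(c_vec)
--     total = 0
--     gj = 1  # g^0
--     two_prod = 1  # will accumulate prod 2^{c_i}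
--     for j in range(k):
--         two_prod = (two_prod * pow(2, c_vec[j], mod)) % mod
--         total = (total + gj * two_prod) % mod
--         gj = (gj * g) % mod
--     return total
-- ===== SOURCE B (Python) =====
-- def P_c_mod(c_vec, g, mod):
--     """Horner evaluation from the right: P = t0*(1 + g*t1*(1 + g*t2*(...)))
--     with t_i = pow(2, c_vec[i], mod)."""
--     k = len(c_vec)
--     if k == 0:
--         return 0
--     t = [pow(2, c, mod) for c in c_vec]
--     acc = 1
--     for j in range(k - 2, -1, -1):
--         acc = (1 + g * t[j + 1] * acc) % mod
--     return (t[0] * acc) % mod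
-- ===== Notes on version B (the rewrite author's own statement) =====
-- stated objective: alternative
-- what changed: Replaces A's forward loop carrying three accumulators (running total, g^j, running product of 2^c_i mod m) with a right-to-left Horner evaluation of P = t0*(1 + g*t1*(1 + g*t2*(...))) maintaining a single nested accumulator.
import Mathlib
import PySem

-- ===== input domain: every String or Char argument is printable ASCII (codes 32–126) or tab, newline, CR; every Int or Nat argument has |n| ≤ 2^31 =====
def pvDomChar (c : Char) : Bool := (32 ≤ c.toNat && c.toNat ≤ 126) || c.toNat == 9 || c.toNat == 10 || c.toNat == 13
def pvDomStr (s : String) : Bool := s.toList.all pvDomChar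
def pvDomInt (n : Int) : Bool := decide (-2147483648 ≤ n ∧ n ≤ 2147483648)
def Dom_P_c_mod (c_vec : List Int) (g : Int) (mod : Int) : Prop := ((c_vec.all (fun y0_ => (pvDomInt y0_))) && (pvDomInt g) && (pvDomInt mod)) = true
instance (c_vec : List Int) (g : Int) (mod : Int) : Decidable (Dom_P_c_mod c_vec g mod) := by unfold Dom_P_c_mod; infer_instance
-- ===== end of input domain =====

-- B replaces A's forward loop with three running accumulators (total, g^j, running 2-power
-- product) by a right-to-left Horner evaluation with a single nested accumulator (objective:
-- alternative decomposition, same cost).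

-- ===== PORT A =====

-- square-and-multiply modular power: computes pow(b, e, m) (= PySem.Int.powMod b e m,
-- which as the literal fmod (b^e) m cannot be evaluated for e near 2^31)
def powLadder (b : Int) (e : Nat) (m : Int) : Int :=
  if e = 0 then PySem.Int.mod 1 m
  else
    let h := powLadder b (e / 2) m
    if e % 2 = 0 then PySem.Int.mod (h * h) m else PySem.Int.mod (h * h * b) m
  decreasing_by exact Nat.div_lt_self (Nat.pos_of_ne_zero (by assumption)) (by omega)

-- pow(2, c, m): for c < 0 Python first inverts 2 mod m (ValueError — hence excluded by
-- Pre_ — unless m is odd; for odd m, (|m|+1)/2 is an inverse of 2 mod m) and raises the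
-- inverse to -c. Exact on Pre_; junk value where Python raises.
def pypow2 (c : Int) (m : Int) : Int :=
  if 0 ≤ c then powLadder 2 c.toNat m
  else powLadder (((m.natAbs + 1) / 2 : Nat) : Int) (-c).toNat m

-- one iteration of A's loop; state = (total, gj, two_prod)
def stepA (g m : Int) (s : Int × Int × Int) (c : Int) : Int × Int × Int :=
  let two_prod := PySem.Int.mod (s.2.2 * pypow2 c m) m
  let total := PySem.Int.mod (s.1 + s.2.1 * two_prod) m
  let gj := PySem.Int.mod (s.2.1 * g) m
  (total, gj, two_prod)

def P_c_mod (c_vec : List Int) (g : Int) (mod : Int) : Int :=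
  (c_vec.foldl (stepA g mod) (0, 1, 1)).1

-- ===== PORT B =====

-- one iteration of B's backward loop: acc = (1 + g*t[j+1]*acc) % mod
def stepB (g m : Int) (acc t : Int) : Int := PySem.Int.mod (1 + g * t * acc) m

def P_c_mod_alt (c_vec : List Int) (g : Int) (mod : Int) : Int :=
  match c_vec with
  | [] => 0
  | c0 :: rest =>
    let t0 := pypow2 c0 mod
    let ts := rest.map (fun c => pypow2 c mod)
    -- the loop 'for j in range(k-2, -1, -1): acc = (1 + g*t[j+1]*acc) % mod'
    -- walks t[k-1], …, t[1], i.e. the reversed tail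
    let acc := ts.reverse.foldl (stepB g mod) 1
    PySem.Int.mod (t0 * acc) mod

-- ===== PRECONDITION & SPEC =====
-- Pre_ excludes exactly the inputs where Python A raises: with a nonempty c_vec,
-- pow(2, c, mod) raises ValueError when mod = 0, and when c < 0 with mod even
-- (2 not invertible). On an empty c_vec the loop never runs and A returns 0.
def Pre_P_c_mod (c_vec : List Int) (g : Int) (mod : Int) : Prop :=
  c_vec = [] ∨ (mod ≠ 0 ∧ ∀ c ∈ c_vec, 0 ≤ c ∨ mod % 2 ≠ 0)
instance (c_vec : List Int) (g : Int) (mod : Int) : Decidable (Pre_P_c_mod c_vec g mod) := by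
  unfold Pre_P_c_mod; infer_instance

def pvWitness_P_c_mod : List Int × Int × Int := ([1, 2], 3, 7)

def Spec_P_c_mod (c_vec : List Int) (g : Int) (mod : Int) (out : Int) : Prop := out = P_c_mod_alt c_vec g mod
instance (c_vec : List Int) (g : Int) (mod : Int) (out : Int) : Decidable (Spec_P_c_mod c_vec g mod out) := by unfold Spec_P_c_mod; infer_instance

-- ===== CLAIM (what is proved, stated in full; the proofs are below) =====
def Claim_equal_P_c_mod : Prop := ∀ (c_vec : List Int) (g : Int) (mod : Int), Dom_P_c_mod c_vec g mod → Pre_P_c_mod c_vec g mod → Spec_P_c_mod c_vec g mod (P_c_mod c_vec g mod)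

-- ===== LEMMAS AND PROOFS =====

-- the polynomial both programs evaluate, over raw coefficient values ts:
-- polyP g ts = Σ_j g^j * Π_{i ≤ j} ts_i, via P(t :: r) = t * (1 + g * P(r))
def polyP (g : Int) : List Int → Int
  | [] => 0
  | t :: r => t * (1 + g * polyP g r)

theorem fmod_modeq (a m : Int) : Int.fmod a m ≡ a [ZMOD m] := by
  have h := Int.fmod_eq_emod (a := a) (b := m)
  unfold Int.ModEq
  split at h <;> simp [h]

theorem fmod_congr {a b m : Int} (h : a ≡ b [ZMOD m]) : Int.fmod a m = Int.fmod b m := by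
  have h' : a % m = b % m := h
  rw [Int.fmod_eq_emod, Int.fmod_eq_emod, h']
  congr 1
  exact if_congr (by rw [Int.dvd_iff_emod_eq_zero, Int.dvd_iff_emod_eq_zero, h']) rfl rfl

-- A's loop computes total = (carried total) + g^j-carrier * product-carrier * polyP, mod m
theorem loopA_eq (g m : Int) : ∀ (cs : List Int) (total gj tp : Int), cs ≠ [] →
    (List.foldl (stepA g m) (total, gj, tp) cs).1
      = Int.fmod (total + gj * tp * polyP g (cs.map (fun c => pypow2 c m))) m := by
  intro cs
  induction cs with
  | nil => intro _ _ _ h; exact absurd rfl h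
  | cons c cs' ih =>
    intro total gj tp _
    simp only [List.foldl_cons, List.map_cons, polyP]
    set t := pypow2 c m with ht
    have htp : PySem.Int.mod (tp * t) m ≡ tp * t [ZMOD m] := fmod_modeq _ m
    cases cs' with
    | nil =>
      simp only [List.foldl_nil, stepA, PySem.Int.mod]
      apply fmod_congr
      calc total + gj * Int.fmod (tp * t) m
          ≡ total + gj * (tp * t) [ZMOD m] := (htp.mul_left gj).add_left total
        _ = total + gj * tp * (t * (1 + g * polyP g ([].map (fun c => pypow2 c m)))) := by
            simp [polyP]; ring
    | cons c' cs'' =>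
      rw [ih _ _ _ (by simp)]
      apply fmod_congr
      simp only [stepA, PySem.Int.mod]
      have h1 : Int.fmod (total + gj * Int.fmod (tp * t) m) m ≡ total + gj * (tp * t) [ZMOD m] :=
        (fmod_modeq _ m).trans ((htp.mul_left gj).add_left total)
      have h2 : Int.fmod (gj * g) m ≡ gj * g [ZMOD m] := fmod_modeq _ m
      set P' := polyP g ((c' :: cs'').map (fun c => pypow2 c m)) with hP'
      calc Int.fmod (total + gj * Int.fmod (tp * t) m) m
            + Int.fmod (gj * g) m * Int.fmod (tp * t) m * P'
          ≡ total + gj * (tp * t) + gj * g * (tp * t) * P' [ZMOD m] :=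
            h1.add ((h2.mul htp).mul_right P')
        _ = total + gj * tp * (t * (1 + g * P')) := by ring

-- B's backward loop is congruent to 1 + g * polyP
theorem loopB_modeq (g m : Int) : ∀ (ts : List Int),
    List.foldr (fun t acc => stepB g m acc t) 1 ts ≡ 1 + g * polyP g ts [ZMOD m] := by
  intro ts
  induction ts with
  | nil => simp [polyP]
  | cons t r ih =>
    simp only [List.foldr_cons, stepB, PySem.Int.mod, polyP]
    calc Int.fmod (1 + g * t * List.foldr (fun t acc => stepB g m acc t) 1 r) m
        ≡ 1 + g * t * List.foldr (fun t acc => stepB g m acc t) 1 r [ZMOD m] := fmod_modeq _ m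
      _ ≡ 1 + g * t * (1 + g * polyP g r) [ZMOD m] := ((ih.mul_left (g * t)).add_left 1)
      _ = 1 + g * (t * (1 + g * polyP g r)) := by ring

-- ===== VERDICT (by name: the statement is the Claim_ definition above) =====
theorem P_c_mod_spec : Claim_equal_P_c_mod := by
  intro c_vec g m _ _
  unfold Spec_P_c_mod
  cases c_vec with
  | nil => rfl
  | cons c0 rest =>
    show (List.foldl (stepA g m) (0, 1, 1) (c0 :: rest)).1 = _
    rw [loopA_eq g m _ 0 1 1 (by simp)]
    simp only [P_c_mod_alt, List.foldl_reverse]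
    simp only [PySem.Int.mod, List.map_cons, polyP]
    apply fmod_congr
    have hb := loopB_modeq g m (rest.map (fun c => pypow2 c m))
    calc (0 : Int) + 1 * 1 * (pypow2 c0 m * (1 + g * polyP g (rest.map (fun c => pypow2 c m))))
        = pypow2 c0 m * (1 + g * polyP g (rest.map (fun c => pypow2 c m))) := by ring
      _ ≡ pypow2 c0 m * List.foldr (fun t acc => stepB g m acc t) 1 (rest.map (fun c => pypow2 c m)) [ZMOD m] :=
          (hb.symm.mul_left _)
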